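-- pv_equiv track=rewrite | github.com/ojashyadav101/lucy | src/lucy/core/safety.py | _infer_app_from_tool
-- ===== SOURCE A (Python) =====
-- def _infer_app_from_tool(tool_name: str) -> str | None:
--     """Map a Composio tool slug to its app slug.
--
--     Examples:
--       GOOGLECALENDAR_EVENTS_LIST → googlecalendar
--       GITHUB_LIST_ISSUES         → github
--       GMAIL_SEND_EMAIL           → gmail
--     """
--     tool_upper = tool_name.upper()
--     _prefix_map = {
--         "GOOGLECALENDAR_": "googlecalendar",
--         "GMAIL_": "gmail",
--         "GOOGLEDRIVE_": "googledrive",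
--         "GOOGLEDOCS_": "googledocs",
--         "GOOGLESHEETS_": "googlesheets",
--         "GITHUB_": "github",
--         "LINEAR_": "linear",
--         "NOTION_": "notion",
--         "SLACK_": "slack",
--         "JIRA_": "jira",
--         "TRELLO_": "trello",
--         "FIGMA_": "figma",
--         "ASANA_": "asana",
--     }
--     for prefix, slug in _prefix_map.items():
--         if tool_upper.startswith(prefix):
--             return slug
--     return None
-- ===== SOURCE B (Python) =====
-- _APP_BY_PREFIX = {
--     "GOOGLECALENDAR": "googlecalendar",
--     "GMAIL": "gmail",
--     "GOOGLEDRIVE": "googledrive",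
--     "GOOGLEDOCS": "googledocs",
--     "GOOGLESHEETS": "googlesheets",
--     "GITHUB": "github",
--     "LINEAR": "linear",
--     "NOTION": "notion",
--     "SLACK": "slack",
--     "JIRA": "jira",
--     "TRELLO": "trello",
--     "FIGMA": "figma",
--     "ASANA": "asana",
-- }
--
--
-- def _infer_app_from_tool(tool_name: str) -> str | None:
--     head, sep, _rest = tool_name.upper().partition("_")
--     return _APP_BY_PREFIX.get(head) if sep else None
-- ===== Notes on version B (the rewrite author's own statement) =====
-- stated objective: idiomatic
-- what changed: Replaces the 13-way startswith scan with a single str.partition at the underscore to split off the prefix, followed by one dict lookup keyed by the bare prefix (no loop, no per-prefix tests).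
import Mathlib
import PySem

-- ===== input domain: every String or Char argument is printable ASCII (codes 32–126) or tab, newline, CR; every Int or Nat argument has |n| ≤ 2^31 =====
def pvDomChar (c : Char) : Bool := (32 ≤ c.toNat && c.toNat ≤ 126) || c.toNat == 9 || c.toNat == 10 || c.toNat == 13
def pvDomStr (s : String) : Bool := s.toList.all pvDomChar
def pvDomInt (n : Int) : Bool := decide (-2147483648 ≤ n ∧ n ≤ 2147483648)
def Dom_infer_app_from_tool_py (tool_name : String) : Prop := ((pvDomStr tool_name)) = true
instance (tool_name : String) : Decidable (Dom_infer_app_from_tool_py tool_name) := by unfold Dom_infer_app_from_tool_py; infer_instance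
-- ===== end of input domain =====

-- B replaces A's 13-way startswith scan by one partition at the underscore plus a single dict lookup (idiomatic).

-- ===== PORT A =====
def pvPrefixMap : List (String × String) :=
  [("GOOGLECALENDAR_", "googlecalendar"), ("GMAIL_", "gmail"), ("GOOGLEDRIVE_", "googledrive"),
   ("GOOGLEDOCS_", "googledocs"), ("GOOGLESHEETS_", "googlesheets"), ("GITHUB_", "github"),
   ("LINEAR_", "linear"), ("NOTION_", "notion"), ("SLACK_", "slack"), ("JIRA_", "jira"),
   ("TRELLO_", "trello"), ("FIGMA_", "figma"), ("ASANA_", "asana")]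

-- the 'for prefix, slug in _prefix_map.items()' loop with its early return
def pvLoopA : List (String × String) → String → Option String
  | [], _ => none
  | (pfx, slug) :: rest, up => if PySem.Str.startswith up pfx then some slug else pvLoopA rest up

def infer_app_from_tool_py (tool_name : String) : Option String :=
  pvLoopA pvPrefixMap (PySem.Str.upper tool_name)

-- ===== PORT B =====
def pvAppByPrefix : PySem.Dict (List Char) String :=
  PySem.Dict.ofList [("GOOGLECALENDAR".toList, "googlecalendar"), ("GMAIL".toList, "gmail"), ("GOOGLEDRIVE".toList, "googledrive"), ("GOOGLEDOCS".toList, "googledocs"), ("GOOGLESHEETS".toList, "googlesheets"), ("GITHUB".toList, "github"), ("LINEAR".toList, "linear"), ("NOTION".toList, "notion"), ("SLACK".toList, "slack"), ("JIRA".toList, "jira"), ("TRELLO".toList, "trello"), ("FIGMA".toList, "figma"), ("ASANA".toList, "asana")]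

def infer_app_from_tool_py_alt (tool_name : String) : Option String :=
  let up := (PySem.Str.upper tool_name).toList
  -- str.partition at the underscore, ported by hand (exact for a one-char separator):
  -- head = chars before the first underscore; the separator was found iff head is a proper prefix of up
  let head := up.takeWhile (· ≠ '_')
  if head.length < up.length then pvAppByPrefix.get? head else none

-- ===== PRECONDITION & SPEC =====
def Spec_infer_app_from_tool_py (tool_name : String) (out : Option String) : Prop := out = infer_app_from_tool_py_alt tool_name
instance (tool_name : String) (out : Option String) : Decidable (Spec_infer_app_from_tool_py tool_name out) := by unfold Spec_infer_app_from_tool_py; infer_instance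

-- ===== CLAIM (what is proved, stated in full; the proofs are below) =====
def Claim_equal_infer_app_from_tool_py : Prop := ∀ (tool_name : String), Dom_infer_app_from_tool_py tool_name → Spec_infer_app_from_tool_py tool_name (infer_app_from_tool_py tool_name)

-- ===== LEMMAS AND PROOFS =====

-- an underscore-terminated prefix q matches l iff the chars before l's first underscore are exactly q and one exists
lemma pv_key (q l : List Char) (hq : '_' ∉ q) :
    (q ++ ['_'] <+: l) ↔ (l.takeWhile (· ≠ '_') = q ∧ (l.takeWhile (· ≠ '_')).length < l.length) := by
  induction l generalizing q with
  | nil =>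
    simp
  | cons c l ih =>
    cases q with
    | nil =>
      by_cases hc : c = '_'
      · subst hc; simp [List.takeWhile, List.cons_prefix_cons]
      · simp [List.takeWhile, hc, List.cons_prefix_cons, Ne.symm hc]
    | cons a q' =>
      have ha : a ≠ '_' := fun h => hq (h ▸ List.mem_cons_self ..)
      have hq' : '_' ∉ q' := fun h => hq (List.mem_cons_of_mem _ h)
      by_cases hc : c = '_'
      · subst hc
        simp only [List.cons_append, List.cons_prefix_cons]
        constructor
        · rintro ⟨rfl, -⟩; exact absurd rfl ha
        · rw [List.takeWhile_cons_of_neg (by simp)]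
          rintro ⟨h, -⟩; exact absurd h.symm (by simp)
      · simp only [List.cons_append, List.cons_prefix_cons]
        rw [List.takeWhile_cons_of_pos (by simpa using hc)]
        rw [ih q' hq']
        constructor
        · rintro ⟨rfl, h1, h2⟩
          refine ⟨by simpa using h1, ?_⟩
          simp only [List.length_cons]
          omega
        · rintro ⟨h1, h2⟩
          obtain ⟨rfl, rfl⟩ : c = a ∧ List.takeWhile (fun x => decide (x ≠ '_')) l = q' := by
            constructor <;> injection h1
          exact ⟨rfl, rfl, by simpa using h2⟩

-- the boolean form used to rewrite A's startswith tests
lemma pv_sw (q l : List Char) (hq : '_' ∉ q) :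
    PySem.Chars.startswith l (q ++ ['_']) =
      (decide (l.takeWhile (· ≠ '_') = q) && decide ((l.takeWhile (· ≠ '_')).length < l.length)) := by
  by_cases h : q ++ ['_'] <+: l
  · have h' := (pv_key q l hq).mp h
    rw [(PySem.Chars.startswith_iff _ _).mpr h]
    symm
    simp only [Bool.and_eq_true, decide_eq_true_eq]
    exact ⟨h'.1, h'.2⟩
  · have hb : PySem.Chars.startswith l (q ++ ['_']) = false := by
      rw [← Bool.not_eq_true, PySem.Chars.startswith_iff]; exact h
    rw [hb]
    rw [pv_key q l hq] at h
    symm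
    simp only [Bool.and_eq_false_iff, decide_eq_false_iff_not]
    by_cases h1 : l.takeWhile (· ≠ '_') = q
    · exact Or.inr (fun h2 => h ⟨h1, h2⟩)
    · exact Or.inl h1

lemma pv_e1 : ("GOOGLECALENDAR_".toList : List Char) = "GOOGLECALENDAR".toList ++ ['_'] := by decide
lemma pv_e2 : ("GMAIL_".toList : List Char) = "GMAIL".toList ++ ['_'] := by decide
lemma pv_e3 : ("GOOGLEDRIVE_".toList : List Char) = "GOOGLEDRIVE".toList ++ ['_'] := by decide
lemma pv_e4 : ("GOOGLEDOCS_".toList : List Char) = "GOOGLEDOCS".toList ++ ['_'] := by decide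
lemma pv_e5 : ("GOOGLESHEETS_".toList : List Char) = "GOOGLESHEETS".toList ++ ['_'] := by decide
lemma pv_e6 : ("GITHUB_".toList : List Char) = "GITHUB".toList ++ ['_'] := by decide
lemma pv_e7 : ("LINEAR_".toList : List Char) = "LINEAR".toList ++ ['_'] := by decide
lemma pv_e8 : ("NOTION_".toList : List Char) = "NOTION".toList ++ ['_'] := by decide
lemma pv_e9 : ("SLACK_".toList : List Char) = "SLACK".toList ++ ['_'] := by decide
lemma pv_e10 : ("JIRA_".toList : List Char) = "JIRA".toList ++ ['_'] := by decide
lemma pv_e11 : ("TRELLO_".toList : List Char) = "TRELLO".toList ++ ['_'] := by decide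
lemma pv_e12 : ("FIGMA_".toList : List Char) = "FIGMA".toList ++ ['_'] := by decide
lemma pv_e13 : ("ASANA_".toList : List Char) = "ASANA".toList ++ ['_'] := by decide

set_option maxHeartbeats 1600000 in
-- B's dict lookup, written out as a 13-way case split on the key
lemma pv_getB (k : List Char) :
    pvAppByPrefix.get? k =
    if k = "GOOGLECALENDAR".toList then some "googlecalendar"
    else if k = "GMAIL".toList then some "gmail"
    else if k = "GOOGLEDRIVE".toList then some "googledrive"
    else if k = "GOOGLEDOCS".toList then some "googledocs"
    else if k = "GOOGLESHEETS".toList then some "googlesheets"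
    else if k = "GITHUB".toList then some "github"
    else if k = "LINEAR".toList then some "linear"
    else if k = "NOTION".toList then some "notion"
    else if k = "SLACK".toList then some "slack"
    else if k = "JIRA".toList then some "jira"
    else if k = "TRELLO".toList then some "trello"
    else if k = "FIGMA".toList then some "figma"
    else if k = "ASANA".toList then some "asana"
    else none := by
  have hi : pvAppByPrefix.items = [("GOOGLECALENDAR".toList, "googlecalendar"), ("GMAIL".toList, "gmail"), ("GOOGLEDRIVE".toList, "googledrive"), ("GOOGLEDOCS".toList, "googledocs"), ("GOOGLESHEETS".toList, "googlesheets"), ("GITHUB".toList, "github"), ("LINEAR".toList, "linear"), ("NOTION".toList, "notion"), ("SLACK".toList, "slack"), ("JIRA".toList, "jira"), ("TRELLO".toList, "trello"), ("FIGMA".toList, "figma"), ("ASANA".toList, "asana")] := by decide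
  by_cases h1 : k = "GOOGLECALENDAR".toList
  · subst h1; decide
  rw [if_neg h1]
  by_cases h2 : k = "GMAIL".toList
  · subst h2; decide
  rw [if_neg h2]
  by_cases h3 : k = "GOOGLEDRIVE".toList
  · subst h3; decide
  rw [if_neg h3]
  by_cases h4 : k = "GOOGLEDOCS".toList
  · subst h4; decide
  rw [if_neg h4]
  by_cases h5 : k = "GOOGLESHEETS".toList
  · subst h5; decide
  rw [if_neg h5]
  by_cases h6 : k = "GITHUB".toList
  · subst h6; decide
  rw [if_neg h6]
  by_cases h7 : k = "LINEAR".toList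
  · subst h7; decide
  rw [if_neg h7]
  by_cases h8 : k = "NOTION".toList
  · subst h8; decide
  rw [if_neg h8]
  by_cases h9 : k = "SLACK".toList
  · subst h9; decide
  rw [if_neg h9]
  by_cases h10 : k = "JIRA".toList
  · subst h10; decide
  rw [if_neg h10]
  by_cases h11 : k = "TRELLO".toList
  · subst h11; decide
  rw [if_neg h11]
  by_cases h12 : k = "FIGMA".toList
  · subst h12; decide
  rw [if_neg h12]
  by_cases h13 : k = "ASANA".toList
  · subst h13; decide
  rw [if_neg h13]
  simp [PySem.Dict.get?, hi]
  exact ⟨fun h => h1 h.symm, fun h => h2 h.symm, fun h => h3 h.symm, fun h => h4 h.symm, fun h => h5 h.symm, fun h => h6 h.symm, fun h => h7 h.symm, fun h => h8 h.symm, fun h => h9 h.symm, fun h => h10 h.symm, fun h => h11 h.symm, fun h => h12 h.symm, fun h => h13 h.symm⟩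

set_option maxHeartbeats 1600000 in
theorem infer_app_from_tool_py_spec : Claim_equal_infer_app_from_tool_py := by
  intro t _
  unfold Spec_infer_app_from_tool_py infer_app_from_tool_py infer_app_from_tool_py_alt
  simp only [pvLoopA, pvPrefixMap, PySem.Str.startswith_eq, pv_e1, pv_e2, pv_e3, pv_e4, pv_e5, pv_e6, pv_e7, pv_e8, pv_e9, pv_e10, pv_e11, pv_e12, pv_e13,
    pv_sw "GOOGLECALENDAR".toList _ (by decide), pv_sw "GMAIL".toList _ (by decide), pv_sw "GOOGLEDRIVE".toList _ (by decide), pv_sw "GOOGLEDOCS".toList _ (by decide), pv_sw "GOOGLESHEETS".toList _ (by decide), pv_sw "GITHUB".toList _ (by decide), pv_sw "LINEAR".toList _ (by decide), pv_sw "NOTION".toList _ (by decide), pv_sw "SLACK".toList _ (by decide), pv_sw "JIRA".toList _ (by decide), pv_sw "TRELLO".toList _ (by decide), pv_sw "FIGMA".toList _ (by decide), pv_sw "ASANA".toList _ (by decide), pv_getB, Bool.and_eq_true, decide_eq_true_eq]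
  by_cases hsep : (((PySem.Str.upper t).toList).takeWhile (· ≠ '_')).length < (PySem.Str.upper t).toList.length
  · simp only [eq_true hsep, and_true, if_true]
  · simp only [eq_false hsep, and_false, if_false]

-- ===== VERDICT (by name: the statement is the Claim_ definition above) =====
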